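-- pv_equiv track=rewrite | github.com/IAmSerepok/Cellular-automatas | Isotropic Non Totalistic Cellular Automata/main.py | convert_rule
-- ===== SOURCE A (Python) =====
-- def convert_rule(string):
--     rules = {}
--     rule = []
--     for c in string:
--         if c in ['8', '7', '6', '5', '4', '3', '2', '1', '0']:
--             if (c == '0') or (c == '8'):
--                 rule = ['']
--             elif not len(rule):
--                 rule = ['c', 'e', 'k', 'a', 'i', 'n', 'y', 'q', 'j', 'r', 't', 'w', 'z']
--             rules[c] = rule
--             rule = []
--         elif c in ['z', 'w', 't', 'r', 'j', 'q', 'y', 'n', 'i', 'a', 'k', 'e', 'c']: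
--             rule.append(c)
--     return rules
-- ===== SOURCE B (Python) =====
-- def convert_rule(string):
--     letters = 'cekainyqjrtwz'
--     f = [c for c in string if c in '012345678' or c in letters]
--     digit_pos = [i for i, c in enumerate(f) if c in '012345678']
--     rules = {}
--     prev = -1
--     for i in digit_pos:
--         d = f[i]
--         run = f[prev + 1:i]
--         if d in '08':
--             rules[d] = ['']
--         elif run:
--             rules[d] = run
--         else:
--             rules[d] = list(letters)
--         prev = i
--     return rules
-- ===== Notes on version B (the rewrite author's own statement) =====
-- stated objective: faster
-- what changed: Replaces A's stateful char-by-char scan (accumulating a letter buffer and flushing it at each digit) with a two-phase pass: filter the string to the recognized alphabet, then locate the digit positions and slice the letter runs between consecutive digits to assemble the dict.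
import Mathlib
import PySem

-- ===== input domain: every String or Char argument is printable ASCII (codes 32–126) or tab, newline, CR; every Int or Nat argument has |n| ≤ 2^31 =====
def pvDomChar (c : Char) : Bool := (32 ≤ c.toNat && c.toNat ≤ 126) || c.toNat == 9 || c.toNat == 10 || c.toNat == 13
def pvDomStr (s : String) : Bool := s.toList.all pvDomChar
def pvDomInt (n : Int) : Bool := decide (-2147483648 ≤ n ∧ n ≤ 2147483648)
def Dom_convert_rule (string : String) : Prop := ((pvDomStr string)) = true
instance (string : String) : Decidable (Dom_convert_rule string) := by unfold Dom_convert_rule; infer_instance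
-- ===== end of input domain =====

-- B replaces the stateful scan by a filter + digit-position + slice two-phase pass (measured constant-factor speedup).

-- ===== PORT A =====
-- the loop body of A's 'for c in string'
def pvAStep (st : PySem.Dict String (List String) × List String) (c : Char) :
    PySem.Dict String (List String) × List String :=
  if c ∈ ['8','7','6','5','4','3','2','1','0'] then
    let rule :=
      if c = '0' ∨ c = '8' then [""]
      else if st.2.length = 0 then ["c","e","k","a","i","n","y","q","j","r","t","w","z"]
      else st.2
    (st.1.insert (String.singleton c) rule, [])
  else if c ∈ ['z','w','t','r','j','q','y','n','i','a','k','e','c'] then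
    (st.1, st.2 ++ [String.singleton c])
  else st

def convert_rule (string : String) : List (String × List String) :=
  ((string.toList.foldl pvAStep ((PySem.Dict.empty : PySem.Dict String (List String)), []))).1.items

-- ===== PORT B =====
def pvDigits : List Char := ['0','1','2','3','4','5','6','7','8']
def pvLetters : List Char := ['c','e','k','a','i','n','y','q','j','r','t','w','z']

-- loop body of B's 'for i in digit_pos' (i is always a valid index of f, so pyGetD's default is never used)
def pvBStep (f : List Char) (st : PySem.Dict String (List String) × Int) (i : Int) :
    PySem.Dict String (List String) × Int :=
  let d := PySem.List.pyGetD f i ' '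
  let run := PySem.List.slice f (some (st.2 + 1)) (some i)
  let rules :=
    if d ∈ ['0','8'] then st.1.insert (String.singleton d) [""]
    else if run ≠ [] then st.1.insert (String.singleton d) (run.map String.singleton)
    else st.1.insert (String.singleton d) (pvLetters.map String.singleton)
  (rules, i)

def convert_rule_alt (string : String) : List (String × List String) :=
  let f := string.toList.filter (fun c => pvDigits.contains c || pvLetters.contains c)
  let digitPos := (PySem.List.enumerate f).filterMap
    (fun p => if p.2 ∈ pvDigits then some p.1 else none)
  ((digitPos.foldl (pvBStep f) ((PySem.Dict.empty : PySem.Dict String (List String)), -1))).1.items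

-- ===== PRECONDITION & SPEC =====
def Spec_convert_rule (string : String) (out : List (String × List String)) : Prop := out = convert_rule_alt string
instance (string : String) (out : List (String × List String)) : Decidable (Spec_convert_rule string out) := by unfold Spec_convert_rule; infer_instance

-- ===== CLAIM (what is proved, stated in full; the proofs are below) =====
def Claim_equal_convert_rule : Prop := ∀ (string : String), Dom_convert_rule string → Spec_convert_rule string (convert_rule string)

-- ===== LEMMAS AND PROOFS =====

-- A skips every char outside the recognized alphabet, so its fold factors through B's filter.
lemma pvA_filter (cs : List Char) (st : PySem.Dict String (List String) × List String) :
    cs.foldl pvAStep st = (cs.filter (fun c => pvDigits.contains c || pvLetters.contains c)).foldl pvAStep st := by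
  induction cs generalizing st with
  | nil => rfl
  | cons c cs ih =>
    rw [List.filter_cons]
    by_cases h : c ∈ pvDigits ∨ c ∈ pvLetters
    · rw [if_pos (by simp only [Bool.or_eq_true, List.contains_iff_mem]; tauto),
        List.foldl_cons, List.foldl_cons]
      exact ih _
    · rw [not_or] at h
      have hd' : ¬ (c ∈ (['8','7','6','5','4','3','2','1','0'] : List Char)) := by
        have := h.1
        simp only [pvDigits, List.mem_cons, List.not_mem_nil, or_false] at this ⊢
        tauto
      have hl' : ¬ (c ∈ (['z','w','t','r','j','q','y','n','i','a','k','e','c'] : List Char)) := by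
        have := h.2
        simp only [pvLetters, List.mem_cons, List.not_mem_nil, or_false] at this ⊢
        tauto
      rw [if_neg (by simp only [Bool.or_eq_true, List.contains_iff_mem]; tauto), List.foldl_cons]
      rw [show pvAStep st c = st from by simp only [pvAStep]; rw [if_neg hd', if_neg hl']]
      exact ih st

-- structural form of B's digit-position comprehension, with absolute start index
def pvDpos : List Char → Int → List Int
  | [], _ => []
  | c :: cs, k => if pvDigits.contains c then k :: pvDpos cs (k + 1) else pvDpos cs (k + 1)

lemma pvDpos_enum (cs : List Char) (s : Int) :
    (PySem.List.enumerate cs s).filterMap (fun p => if p.2 ∈ pvDigits then some p.1 else none)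
      = pvDpos cs s := by
  induction cs generalizing s with
  | nil => simp [PySem.List.enumerate_nil, pvDpos]
  | cons c cs ih =>
    rw [PySem.List.enumerate_cons]
    by_cases hd : c ∈ pvDigits
    · simp [hd, pvDpos, ih]
    · simp [hd, pvDpos, ih]

-- the invariant connecting A's (dict, letter-buffer) scan to B's (dict, prev) walk over digit positions
lemma pvMain (f : List Char) : ∀ (n k j : Nat) (d : PySem.Dict String (List String)),
    j ≤ k → k ≤ f.length →
    (∀ i (hi : i < f.length), j ≤ i → i < k → pvDigits.contains f[i] = false) →
    (∀ c ∈ f, (pvDigits.contains c || pvLetters.contains c) = true) →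
    n = f.length - k →
    ((f.drop k).foldl pvAStep (d, ((f.drop j).take (k - j)).map String.singleton)).1
      = ((pvDpos (f.drop k) (k : Int)).foldl (pvBStep f) (d, (j : Int) - 1)).1 := by
  intro n
  induction n with
  | zero =>
    intro k j d hjk hk hnd hall hn
    have hke : k = f.length := by omega
    simp [hke, List.drop_length, pvDpos]
  | succ n ih =>
    intro k j d hjk hk hnd hall hn
    have hklt : k < f.length := by omega
    have hdrop : f.drop k = f[k] :: f.drop (k + 1) := List.drop_eq_getElem_cons hklt
    rw [hdrop]
    by_cases hdig : pvDigits.contains f[k] = true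
    · -- f[k] is a digit: A flushes its buffer, B emits position k with the matching slice
      have hmemA : f[k] ∈ (['8','7','6','5','4','3','2','1','0'] : List Char) := by
        have := (List.contains_iff_mem).mp hdig
        simp only [pvDigits, List.mem_cons, List.not_mem_nil, or_false] at this ⊢
        tauto
      have hgetB : PySem.List.pyGetD f ((k : Int)) ' ' = f[k] := by
        rw [PySem.List.pyGetD_natCast]
        exact List.getD_eq_getElem f ' ' hklt
      have hrunB : PySem.List.slice f (some ((j : Int) - 1 + 1)) (some (k : Int))
          = (f.drop j).take (k - j) := by
        rw [show ((j : Int) - 1 + 1) = (j : Int) by ring, PySem.List.slice_natCast]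
      have hdict :
          (pvAStep (d, ((f.drop j).take (k - j)).map String.singleton) f[k]).1
            = (pvBStep f (d, (j : Int) - 1) (k : Int)).1 := by
        simp only [pvAStep, pvBStep, if_pos hmemA, hgetB, hrunB]
        by_cases h08 : f[k] = '0' ∨ f[k] = '8'
        · have hmem08 : f[k] ∈ (['0','8'] : List Char) := by
            simp only [List.mem_cons, List.not_mem_nil, or_false]; tauto
          rw [if_pos h08, if_pos hmem08]
        · have hmem08 : f[k] ∉ (['0','8'] : List Char) := by
            simp only [List.mem_cons, List.not_mem_nil, or_false]; tauto
          rw [if_neg h08, if_neg hmem08]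
          by_cases hrun : List.take (k - j) (List.drop j f) = []
          · have hlen : (List.map String.singleton (List.take (k - j) (List.drop j f))).length = 0 := by
              rw [hrun]; rfl
            rw [if_pos hlen, if_neg (not_not_intro hrun)]
            have hdef : pvLetters.map String.singleton
                = ["c","e","k","a","i","n","y","q","j","r","t","w","z"] := by decide
            rw [hdef]
          · have hlen : ¬ (List.map String.singleton (List.take (k - j) (List.drop j f))).length = 0 := by
              rw [List.length_map]
              intro h0
              exact hrun (List.length_eq_zero_iff.mp h0)
            rw [if_neg hlen, if_pos hrun]
      have hstep :
          pvAStep (d, ((f.drop j).take (k - j)).map String.singleton) f[k]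
            = ((pvBStep f (d, (j : Int) - 1) (k : Int)).1, []) := by
        rw [← hdict]
        simp only [pvAStep, if_pos hmemA]
      have hdp : pvDpos (f[k] :: f.drop (k + 1)) (k : Int)
          = (k : Int) :: pvDpos (f.drop (k + 1)) ((k + 1 : Nat) : Int) := by
        show (if pvDigits.contains f[k] = true then
            (k : Int) :: pvDpos (f.drop (k + 1)) ((k : Int) + 1)
          else pvDpos (f.drop (k + 1)) ((k : Int) + 1)) = _
        rw [if_pos hdig]
        norm_cast
      rw [hdp, List.foldl_cons, List.foldl_cons, hstep]
      have hih := ih (k + 1) (k + 1) (pvBStep f (d, (j : Int) - 1) (k : Int)).1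
        (le_refl _) (by omega) (by intro i hi h1 h2; omega) hall (by omega)
      simp only [Nat.sub_self, List.take_zero, List.map_nil] at hih
      rw [hih]
      have hpair : ((pvBStep f (d, (j : Int) - 1) (k : Int)).1, ((k + 1 : Nat) : Int) - 1)
          = pvBStep f (d, (j : Int) - 1) (k : Int) := by
        have hprev : ((k + 1 : Nat) : Int) - 1 = (pvBStep f (d, (j : Int) - 1) (k : Int)).2 := by
          show ((k + 1 : Nat) : Int) - 1 = (k : Int)
          push_cast
          ring
        rw [hprev]
      rw [hpair]
    · -- f[k] is a letter: A appends it to the buffer, B's digit-position list skips it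
      have hdigf : pvDigits.contains f[k] = false := by
        simpa using hdig
      have hlet : pvLetters.contains f[k] = true := by
        have h := hall f[k] (List.getElem_mem hklt)
        rw [Bool.or_eq_true] at h
        exact h.resolve_left hdig
      have hmemA : f[k] ∉ (['8','7','6','5','4','3','2','1','0'] : List Char) := by
        intro hm
        apply hdig
        rw [List.contains_iff_mem]
        simp only [pvDigits, List.mem_cons, List.not_mem_nil, or_false] at hm ⊢
        tauto
      have hmemL : f[k] ∈ (['z','w','t','r','j','q','y','n','i','a','k','e','c'] : List Char) := by
        have := (List.contains_iff_mem).mp hlet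
        simp only [pvLetters, List.mem_cons, List.not_mem_nil, or_false] at this ⊢
        tauto
      have htake : ((f.drop j).take (k - j)).map String.singleton ++ [String.singleton f[k]]
          = ((f.drop j).take (k + 1 - j)).map String.singleton := by
        have h1 : k + 1 - j = (k - j) + 1 := by omega
        have h2 : (f.drop j)[k - j]? = some f[k] := by
          rw [List.getElem?_drop, show j + (k - j) = k by omega]
          exact List.getElem?_eq_getElem hklt
        rw [h1, List.take_add_one, h2]
        simp
      have hstep :
          pvAStep (d, ((f.drop j).take (k - j)).map String.singleton) f[k]
            = (d, ((f.drop j).take (k + 1 - j)).map String.singleton) := by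
        simp only [pvAStep, if_neg hmemA, if_pos hmemL]
        rw [htake]
      have hdp : pvDpos (f[k] :: f.drop (k + 1)) (k : Int)
          = pvDpos (f.drop (k + 1)) ((k + 1 : Nat) : Int) := by
        show (if pvDigits.contains f[k] = true then
            (k : Int) :: pvDpos (f.drop (k + 1)) ((k : Int) + 1)
          else pvDpos (f.drop (k + 1)) ((k : Int) + 1)) = _
        rw [if_neg hdig]
        norm_cast
      rw [hdp, List.foldl_cons, hstep]
      exact ih (k + 1) j d (by omega) (by omega)
        (by
          intro i hi h1 h2
          by_cases hik : i < k
          · exact hnd i hi h1 hik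
          · have hik' : i = k := by omega
            subst hik'
            exact hdigf)
        hall (by omega)

-- ===== VERDICT (by name: the statement is the Claim_ definition above) =====
theorem convert_rule_spec : Claim_equal_convert_rule := by
  intro s _
  unfold Spec_convert_rule convert_rule convert_rule_alt
  dsimp only
  rw [pvA_filter, pvDpos_enum]
  have hmain := pvMain (s.toList.filter (fun c => pvDigits.contains c || pvLetters.contains c))
      (s.toList.filter (fun c => pvDigits.contains c || pvLetters.contains c)).length 0 0
      PySem.Dict.empty (le_refl 0) (Nat.zero_le _)
      (fun i hi h1 h2 => absurd h2 (Nat.not_lt_zero i))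
      (fun c hc => (List.mem_filter.mp hc).2) (by omega)
  simpa using congrArg PySem.Dict.items hmain
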